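-- pv_equiv track=rewrite | github.com/qchenjie/leetcode | lc02/binary search/查找最后一个等于目标值的元素.py | LastTargetElemnts
-- ===== SOURCE A (Python) =====
-- def LastTargetElemnts(nums, target):
--     """查找最后一个等于目标值的元素"""
--     if nums == None or len(nums) == 0:
--         return -1
--     left = 0
--     right = len(nums) - 1
--     while left <= right:
--         mid = left + (right - left) // 2
--         if nums[mid] == target:
--             # 如果当前的等于target,还要再判断一下后面一个是否等于，如果不等于，这就是最后一个
--             # 如果等于，那后面的相当于还有，直接把left放到mid+1中去
--             if mid == len(nums)-1 or nums[mid + 1] != target: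
--                 return mid
--             else:
--                 left = mid + 1
--         # 这里要改的就是在等于那里判断一下。其他的不等于就不用动了
--         elif target < nums[mid]:
--             right = mid - 1
--         else:
--             left = mid + 1
--     return False
-- ===== SOURCE B (Python) =====
-- def LastTargetElemnts(nums, target):
--     """查找最后一个等于目标值的元素"""
--     if nums == None or len(nums) == 0:
--         return -1
--     for i in range(len(nums) - 1, -1, -1):
--         if nums[i] == target:
--             return i
--     return False
-- ===== Notes on version B (the rewrite author's own statement) =====
-- stated objective: simpler
-- what changed: B replaces A's binary search (with its nums[mid+1] neighbour peek) by a straight reverse linear scan returning the first index from the right equal to target; Pre_ restricts to binary search's natural domain (sorted lists) and to inputs where A returns an int (empty list or target present), and there the results coincide.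
-- outside the precondition, e.g. on LastTargetElemnts([0, 2, -2, 2], 2): A returns 1, B returns 3; on LastTargetElemnts([1, 3], 2): A returns False, B returns False
import Mathlib
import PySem

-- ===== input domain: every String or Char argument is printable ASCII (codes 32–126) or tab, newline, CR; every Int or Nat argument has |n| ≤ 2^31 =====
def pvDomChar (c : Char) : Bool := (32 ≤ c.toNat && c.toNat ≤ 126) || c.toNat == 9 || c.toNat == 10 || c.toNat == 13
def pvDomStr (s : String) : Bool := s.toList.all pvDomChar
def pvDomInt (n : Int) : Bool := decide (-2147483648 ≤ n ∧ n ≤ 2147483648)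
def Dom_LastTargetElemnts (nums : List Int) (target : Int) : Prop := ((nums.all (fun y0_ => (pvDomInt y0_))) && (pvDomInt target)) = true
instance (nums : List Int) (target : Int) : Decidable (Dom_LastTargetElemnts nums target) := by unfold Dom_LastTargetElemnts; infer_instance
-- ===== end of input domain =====

-- B replaces A's binary search (with its nums[mid+1] neighbour peek) by a straight reverse
-- linear scan; on sorted lists (Pre_) both return the last index equal to target.
-- Python's `return False` on a nonempty list without the target is ported as 0 (False == 0 in Python).

-- ===== PORT A =====
-- mid = left + (right - left) // 2  (named so the lemmas can cite its bounds)
def pvMidA (left right : Int) : Int := left + PySem.Int.floordiv (right - left) 2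

-- the while-loop of A; `fuel` only bounds the iteration count (length+1 always suffices),
-- and `none` from pyGet? is Python's IndexError (never reached from the entry point)
def pvLoopA (nums : List Int) (target : Int) (fuel : Nat) (left right : Int) : Int :=
  match fuel with
  | 0 => 0
  | fuel + 1 =>
    if left ≤ right then
      match PySem.List.pyGet? nums (pvMidA left right) with
      | none => 0
      | some v =>
        if v = target then
          if pvMidA left right = (nums.length : Int) - 1 then pvMidA left right
          else
            match PySem.List.pyGet? nums (pvMidA left right + 1) with
            | none => 0
            | some w =>
              if w ≠ target then pvMidA left right
              else pvLoopA nums target fuel (pvMidA left right + 1) right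
        else if target < v then pvLoopA nums target fuel left (pvMidA left right - 1)
        else pvLoopA nums target fuel (pvMidA left right + 1) right
    else 0

def LastTargetElemnts (nums : List Int) (target : Int) : Int :=
  if nums.length = 0 then -1
  else pvLoopA nums target (nums.length + 1) 0 ((nums.length : Int) - 1)

-- ===== PORT B =====
-- the for-loop of B: `for i in range(len(nums)-1, -1, -1)`, current index is k-1;
-- falling off the loop is Python's `return False` (False == 0)
def pvScanB (nums : List Int) (target : Int) : Nat → Int
  | 0 => 0
  | k + 1 =>
    match PySem.List.pyGet? nums (k : Int) with
    | none => 0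
    | some v => if v = target then (k : Int) else pvScanB nums target k

def LastTargetElemnts_alt (nums : List Int) (target : Int) : Int :=
  if nums.length = 0 then -1
  else pvScanB nums target nums.length

-- ===== PRECONDITION & SPEC =====
-- Pre_ restricts to binary search's natural domain — sorted lists — and to inputs on which
-- A's result is an int: on a nonempty list not containing target A returns the bool False,
-- which is outside the declared Int return type, so those inputs are excluded.
def Pre_LastTargetElemnts (nums : List Int) (target : Int) : Prop :=
  List.Pairwise (· ≤ ·) nums ∧ (nums = [] ∨ target ∈ nums)
instance (nums : List Int) (target : Int) : Decidable (Pre_LastTargetElemnts nums target) := by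
  unfold Pre_LastTargetElemnts; infer_instance

def pvWitness_LastTargetElemnts : List Int × Int := ([1, 2, 2, 3], 2)

def Spec_LastTargetElemnts (nums : List Int) (target : Int) (out : Int) : Prop :=
  out = LastTargetElemnts_alt nums target
instance (nums : List Int) (target : Int) (out : Int) : Decidable (Spec_LastTargetElemnts nums target out) := by
  unfold Spec_LastTargetElemnts; infer_instance

-- ===== CLAIM (what is proved, stated in full; the proofs are below) =====
def Claim_equal_LastTargetElemnts : Prop := ∀ (nums : List Int) (target : Int), Dom_LastTargetElemnts nums target → Pre_LastTargetElemnts nums target → Spec_LastTargetElemnts nums target (LastTargetElemnts nums target)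

-- ===== LEMMAS AND PROOFS =====

theorem pvMidA_bounds (left right : Int) (h : left ≤ right) :
    left ≤ pvMidA left right ∧ pvMidA left right ≤ right := by
  unfold pvMidA
  rw [PySem.Int.floordiv_eq_ediv_of_pos (by norm_num)]
  omega

-- sorted lists are monotone through `getElem?`
theorem pv_sorted_le {nums : List Int} (hs : List.Pairwise (· ≤ ·) nums)
    {i j : Nat} (hij : i ≤ j) {a b : Int}
    (ha : nums[i]? = some a) (hb : nums[j]? = some b) : a ≤ b := by
  have hi : i < nums.length := by
    rcases List.getElem?_eq_some_iff.1 ha with ⟨h, _⟩; exact h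
  have hj : j < nums.length := by
    rcases List.getElem?_eq_some_iff.1 hb with ⟨h, _⟩; exact h
  have ha' : nums[i] = a := by
    rcases List.getElem?_eq_some_iff.1 ha with ⟨_, h⟩; exact h
  have hb' : nums[j] = b := by
    rcases List.getElem?_eq_some_iff.1 hb with ⟨_, h⟩; exact h
  rcases Nat.lt_or_ge i j with hlt | hge
  · have := (List.pairwise_iff_getElem.1 hs) i j hi hj hlt
    simpa [ha', hb'] using this
  · have hij' : i = j := le_antisymm hij hge
    subst hij'
    have : a = b := by rw [← ha', ← hb']
    omega

-- an in-range pyGet? is the getElem? of the toNat index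
theorem pvGetIn {nums : List Int} {i : Int} (h0 : 0 ≤ i)
    (hn : i ≤ (nums.length : Int) - 1) :
    PySem.List.pyGet? nums i = some (nums[i.toNat]'(by omega)) := by
  rw [PySem.List.pyGet?_of_nonneg nums h0]
  exact List.getElem?_eq_getElem (by omega)

theorem pvLoopA_found (nums : List Int) (target : Int)
    (hs : List.Pairwise (· ≤ ·) nums) (L : Nat)
    (hL : nums[L]? = some target)
    (hLg : ∀ j : Nat, L < j → nums[j]? ≠ some target) :
    ∀ (fuel : Nat) (left right : Int), (right + 1 - left).toNat < fuel →
      0 ≤ left → right ≤ (nums.length : Int) - 1 →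
      left ≤ (L : Int) → (L : Int) ≤ right →
      pvLoopA nums target fuel left right = (L : Int) := by
  have hLlen : L < nums.length := by
    rcases List.getElem?_eq_some_iff.1 hL with ⟨h, _⟩; exact h
  intro fuel
  induction fuel with
  | zero => intro left right hk h0 hn hl hr; exfalso; omega
  | succ fuel ih =>
    intro left right hk h0 hn hl hr
    have hlr : left ≤ right := le_trans hl hr
    have hmid := pvMidA_bounds left right hlr
    set mid := pvMidA left right with hmiddef
    have hm0 : 0 ≤ mid := le_trans h0 hmid.1
    have hmn : mid ≤ (nums.length : Int) - 1 := le_trans hmid.2 hn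
    have hget := pvGetIn (nums := nums) hm0 hmn
    rw [pvLoopA, if_pos hlr, ← hmiddef]
    simp only [hget]
    set v := nums[mid.toNat]'(by omega) with hvdef
    have hv? : nums[mid.toNat]? = some v := List.getElem?_eq_getElem _
    by_cases hv : v = target
    · -- nums[mid] == target; mid is an occurrence, so mid ≤ L
      have hmL : mid.toNat ≤ L := by
        by_contra hgt
        exact hLg mid.toNat (by omega) (by rw [hv?, hv])
      rw [if_pos hv]
      by_cases hend : mid = (nums.length : Int) - 1
      · -- mid is the last index, return mid; L ≤ n-1 = mid so mid = L
        rw [if_pos hend]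
        omega
      · -- peek at nums[mid+1]
        have hget1 := pvGetIn (nums := nums) (i := mid + 1) (by omega) (by omega)
        rw [if_neg hend]
        simp only [hget1]
        set w := nums[(mid + 1).toNat]'(by omega) with hwdef
        have hw? : nums[(mid + 1).toNat]? = some w := List.getElem?_eq_getElem _
        by_cases hw : w = target
        · -- next one still target: occurrence at mid+1, recurse right half
          rw [if_neg (by simpa using hw)]
          have hm1L : (mid + 1).toNat ≤ L := by
            by_contra hgt
            exact hLg (mid + 1).toNat (by omega) (by rw [hw?, hw])
          exact ih (mid + 1) right (by omega) (by omega) hn (by omega) hr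
        · -- next one differs: mid is the last occurrence, i.e. mid = L
          rw [if_pos hw]
          have : L ≤ mid.toNat := by
            by_contra hgt
            have hle : (mid + 1).toNat ≤ L := by omega
            have h1 : target ≤ w := by
              have := pv_sorted_le hs (i := mid.toNat) (j := (mid + 1).toNat)
                (by omega) hv? hw?
              rw [hv] at this; exact this
            have h2 : w ≤ target := pv_sorted_le hs hle hw? hL
            exact hw (le_antisymm h2 h1)
          omega
    · rw [if_neg hv]
      by_cases hlt : target < v
      · -- target < nums[mid]: every index ≥ mid exceeds target, so L < mid
        rw [if_pos hlt]
        have hLm : L < mid.toNat := by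
          by_contra hge
          have := pv_sorted_le hs (i := mid.toNat) (j := L) (by omega) hv? hL
          omega
        exact ih left (mid - 1) (by omega) h0 (by omega) hl (by omega)
      · -- nums[mid] < target: every index ≤ mid is below target, so mid < L
        rw [if_neg hlt]
        have hLm : mid.toNat < L := by
          by_contra hge
          have := pv_sorted_le hs (i := L) (j := mid.toNat) (by omega) hL hv?
          omega
        exact ih (mid + 1) right (by omega) (by omega) hn (by omega) hr

-- the reverse scan returns the last occurrence L when one exists below k
theorem pvScanB_found (nums : List Int) (target : Int) (L : Nat)
    (hL : nums[L]? = some target)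
    (hLg : ∀ j : Nat, L < j → nums[j]? ≠ some target) :
    ∀ k : Nat, L < k → k ≤ nums.length →
      pvScanB nums target k = (L : Int) := by
  intro k
  induction k with
  | zero => intro h _; exact absurd h (by omega)
  | succ k ih =>
    intro hLk hkn
    have hv? : nums[k]? = some (nums[k]'(by
        rcases Nat.lt_or_ge k nums.length with h | h
        · exact h
        · exfalso
          have hLlen : L < nums.length := by
            rcases List.getElem?_eq_some_iff.1 hL with ⟨h', _⟩; exact h'
          omega)) := List.getElem?_eq_getElem _
    simp only [pvScanB, PySem.List.pyGet?_natCast, hv?]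
    set v := nums[k]'_ with hvdef
    by_cases hv : v = target
    · rw [if_pos hv]
      have hk : ¬ L < k := fun h => hLg k h (by rw [hv?, hv])
      have : k = L := by omega
      simp [this]
    · rw [if_neg hv]
      have hkL : k ≠ L := by
        intro h; subst h
        rw [hv?] at hL
        exact hv (by simpa using hL)
      exact ih (by omega) (by omega)

-- ===== VERDICT (by name: the statement is the Claim_ definition above) =====
theorem LastTargetElemnts_spec : Claim_equal_LastTargetElemnts := by
  intro nums target _ hpre
  obtain ⟨hsort, hmemOr⟩ := hpre
  unfold Spec_LastTargetElemnts LastTargetElemnts LastTargetElemnts_alt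
  by_cases hlen : nums.length = 0
  · simp [hlen]
  · simp only [hlen, if_false]
    have hmem : target ∈ nums := by
      rcases hmemOr with h | h
      · exact absurd (by simp [h]) hlen
      · exact h
    obtain ⟨i₀, hi₀len, hi₀⟩ := List.mem_iff_getElem.1 hmem
    have hi₀? : nums[i₀]? = some target := by
      rw [List.getElem?_eq_getElem hi₀len, hi₀]
    have hLspec : nums[Nat.findGreatest (fun j => nums[j]? = some target) (nums.length - 1)]? = some target :=
      by simpa using Nat.findGreatest_spec (P := fun j => nums[j]? = some target) (m := i₀) (n := nums.length - 1) (by omega) hi₀?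
    set L := Nat.findGreatest (fun j => nums[j]? = some target) (nums.length - 1) with hLdef
    have hLg : ∀ j : Nat, L < j → nums[j]? ≠ some target := by
      intro j hj hcontra
      have hjlen : j < nums.length := by
        rcases List.getElem?_eq_some_iff.1 hcontra with ⟨h, _⟩; exact h
      exact Nat.findGreatest_is_greatest hj (by omega) hcontra
    have hLlen : L < nums.length := by
      rcases List.getElem?_eq_some_iff.1 hLspec with ⟨h, _⟩; exact h
    rw [pvLoopA_found nums target hsort L hLspec hLg
          (nums.length + 1) 0 ((nums.length : Int) - 1)
          (by omega) (by omega) (by omega) (by omega) (by omega),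
        pvScanB_found nums target L hLspec hLg nums.length (by omega) (by omega)]
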